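-- pv_equiv track=rewrite | github.com/joshanashakya/dissertation | workspace/dataset/java-python/GeeksForGeeks/449/A/2.py | CountAllZero
-- ===== SOURCE A (Python) =====
-- Row = 4
--
-- Col = 5
--
-- r = [0, 0, 1, -1 ]
--
-- c = [1, -1, 0, 0 ]
--
-- def isSafe(x, y, M):
--
--     if (x >= 0 and x < Row and y >= 0 and y < Col):
--         if M[x][y] == 0:
--             return True
--
--     return False
--
-- def DFS(x, y, M):
--
--     # make it's visited
--     M[x][y] = 1
--     for k in range(4):
--         if (isSafe(x + r[k], y + c[k], M)):
--             DFS(x + r[k], y + c[k], M)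
--
-- def CountAllZero(M):
--
--     # first we remove all zeros which are not
--     # surrounded by 1 that means we only remove
--     # those zeros which are reachable from
--     # any boundary of given matrix.
--     for i in range(Col):
--         if (M[0][i] == 0):
--             DFS(0, i, M)
--     for i in range(Col):
--         if (M[Row - 1][i] == 0):
--             DFS(Row - 1, i, M)
--     for i in range(Row):
--         if (M[i][0] == 0):
--             DFS(i, 0, M)
--     for i in range(Row):
--         if (M[i][Col - 1] == 0):
--             DFS(i, Col - 1, M)
--
--     # count all zeros which are surrounded by 1
--     result = 0
--     for i in range(Row):
--         for j in range(Col):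
--             if (M[i][j] == 0):
--                 result += 1
--
--     return result
-- ===== SOURCE B (Python) =====
-- # Iterative flood fill from boundary zeros (explicit stack, mark on push) instead of recursive DFS.
-- # Like A, mutates M in place (marks the same cells 1); equivalence is about the return value.
-- Row = 4
-- Col = 5
--
-- def CountAllZero(M):
--     stack = []
--     for i in range(Row):
--         for j in range(Col):
--             if (i == 0 or i == Row - 1 or j == 0 or j == Col - 1) and M[i][j] == 0:
--                 M[i][j] = 1
--                 stack.append((i, j))
--     while stack:
--         x, y = stack.pop()
--         for dx, dy in ((0, 1), (0, -1), (1, 0), (-1, 0)):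
--             nx, ny = x + dx, y + dy
--             if 0 <= nx < Row and 0 <= ny < Col and M[nx][ny] == 0:
--                 M[nx][ny] = 1
--                 stack.append((nx, ny))
--     result = 0
--     for i in range(Row):
--         for j in range(Col):
--             if M[i][j] == 0:
--                 result += 1
--     return result
-- ===== Notes on version B (the rewrite author's own statement) =====
-- stated objective: alternative
-- what changed: Replaces the recursive 4-direction DFS launched from each boundary zero by a single boundary sweep that seeds an explicit stack and an iterative flood-fill loop (mark-on-push), followed by the same zero count.
import Mathlib
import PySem

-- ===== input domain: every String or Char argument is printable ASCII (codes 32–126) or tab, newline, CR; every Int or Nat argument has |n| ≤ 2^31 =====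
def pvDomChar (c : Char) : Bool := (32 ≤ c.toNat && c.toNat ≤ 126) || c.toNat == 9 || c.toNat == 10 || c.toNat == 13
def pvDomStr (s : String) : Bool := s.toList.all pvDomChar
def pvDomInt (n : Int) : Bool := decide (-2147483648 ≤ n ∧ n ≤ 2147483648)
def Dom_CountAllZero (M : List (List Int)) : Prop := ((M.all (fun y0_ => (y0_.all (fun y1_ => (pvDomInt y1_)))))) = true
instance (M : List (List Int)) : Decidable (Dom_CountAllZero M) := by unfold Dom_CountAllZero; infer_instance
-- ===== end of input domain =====

-- B replaces A's recursive boundary DFS by an explicit-stack iterative flood fill (mark on push);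
-- both Pythons mutate M in place identically — the equivalence proved here is about the return value.

-- ===== PORT A =====
-- M[x][y] read / write, used only at indices the Python guards keep in range (Pre_ gives the shape)
def pvMget (M : List (List Int)) (x y : Int) : Int := (M.getD x.toNat []).getD y.toNat 0
def pvMset (M : List (List Int)) (x y : Int) (v : Int) : List (List Int) :=
  M.modify x.toNat (fun row => row.set y.toNat v)

def pvR : List Int := [0, 0, 1, -1]
def pvC : List Int := [1, -1, 0, 0]

def isSafe (x y : Int) (M : List (List Int)) : Bool :=
  if 0 ≤ x ∧ x < 4 ∧ 0 ≤ y ∧ y < 5 then pvMget M x y == 0 else false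

-- recursive DFS; the Nat fuel is only a totality guard (marking strictly decreases the
-- number of zeros in the 4×5 window, so fuel 20 is never exhausted — proved below)
mutual
def DFS : Nat → Int → Int → List (List Int) → List (List Int)
  | 0, _, _, M => M
  | fuel+1, x, y, M => dfsGo fuel x y (List.range 4) (pvMset M x y 1)
  termination_by fuel _ _ _ => (fuel, 0)
def dfsGo : Nat → Int → Int → List Nat → List (List Int) → List (List Int)
  | _, _, _, [], M => M
  | fuel, x, y, k :: ks, M =>
    dfsGo fuel x y ks
      (if isSafe (x + pvR.getD k 0) (y + pvC.getD k 0) M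
       then DFS fuel (x + pvR.getD k 0) (y + pvC.getD k 0) M else M)
  termination_by fuel _ _ ks _ => (fuel, ks.length + 1)
end

def CountAllZero (M : List (List Int)) : Int :=
  let M1 := (List.range 5).foldl (fun M (i : Nat) => if pvMget M 0 (i : Int) = 0 then DFS 20 0 (i : Int) M else M) M
  let M2 := (List.range 5).foldl (fun M (i : Nat) => if pvMget M (4 - 1) (i : Int) = 0 then DFS 20 (4 - 1) (i : Int) M else M) M1
  let M3 := (List.range 4).foldl (fun M (i : Nat) => if pvMget M (i : Int) 0 = 0 then DFS 20 (i : Int) 0 M else M) M2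
  let M4 := (List.range 4).foldl (fun M (i : Nat) => if pvMget M (i : Int) (5 - 1) = 0 then DFS 20 (i : Int) (5 - 1) M else M) M3
  (List.range 4).foldl (fun res (i : Nat) =>
    (List.range 5).foldl (fun res (j : Nat) => if pvMget M4 (i : Int) (j : Int) = 0 then res + 1 else res) res) 0

-- ===== PORT B =====
def pvDirs : List (Int × Int) := [(0, 1), (0, -1), (1, 0), (-1, 0)]

-- worklist loop; fuel is only a totality guard (every push marks a fresh zero, so
-- stack length + remaining zeros strictly decreases — proved below)
def flood : Nat → List (Int × Int) → List (List Int) → List (List Int)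
  | _, [], M => M
  | 0, _ :: _, M => M
  | fuel+1, p :: stk, M =>
    let st := pvDirs.foldl (fun st d =>
      if 0 ≤ p.1 + d.1 ∧ p.1 + d.1 < 4 ∧ 0 ≤ p.2 + d.2 ∧ p.2 + d.2 < 5 ∧
          pvMget st.1 (p.1 + d.1) (p.2 + d.2) = 0
      then (pvMset st.1 (p.1 + d.1) (p.2 + d.2) 1, (p.1 + d.1, p.2 + d.2) :: st.2)
      else st) (M, stk)
    flood fuel st.2 st.1

def CountAllZero_alt (M : List (List Int)) : Int :=
  let st := (List.range 4).foldl (fun st (i : Nat) =>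
    (List.range 5).foldl (fun st (j : Nat) =>
      if (i = 0 ∨ i = 4 - 1 ∨ j = 0 ∨ j = 5 - 1) ∧ pvMget st.1 (i : Int) (j : Int) = 0
      then (pvMset st.1 (i : Int) (j : Int) 1, ((i : Int), (j : Int)) :: st.2)
      else st) st) (M, ([] : List (Int × Int)))
  let Mf := flood 20 st.2 st.1
  (List.range 4).foldl (fun res (i : Nat) =>
    (List.range 5).foldl (fun res (j : Nat) => if pvMget Mf (i : Int) (j : Int) = 0 then res + 1 else res) res) 0

-- ===== PRECONDITION & SPEC =====
-- exactly the inputs on which the Python A returns (otherwise M[x][y] raises IndexError):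
-- at least 4 rows, and each of the first 4 rows has at least 5 entries
def Pre_CountAllZero (M : List (List Int)) : Prop :=
  4 ≤ M.length ∧ ∀ i : Nat, i < 4 → 5 ≤ (M.getD i []).length
instance (M : List (List Int)) : Decidable (Pre_CountAllZero M) := by
  unfold Pre_CountAllZero; infer_instance

def pvWitness_CountAllZero : List (List Int) :=
  [[1, 1, 1, 1, 1], [1, 0, 1, 0, 1], [1, 1, 0, 1, 1], [1, 1, 1, 1, 1]]

def Spec_CountAllZero (M : List (List Int)) (out : Int) : Prop := out = CountAllZero_alt M
instance (M : List (List Int)) (out : Int) : Decidable (Spec_CountAllZero M out) := by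
  unfold Spec_CountAllZero; infer_instance

-- ===== CLAIM (what is proved, stated in full; the proofs are below) =====
def Claim_equal_CountAllZero : Prop :=
  ∀ (M : List (List Int)), Dom_CountAllZero M → Pre_CountAllZero M →
    Spec_CountAllZero M (CountAllZero M)

-- ===== LEMMAS AND PROOFS =====

-- named stages of the two pipelines (proof-only abbreviations; definitionally equal to the ports)
def pvA1 (M : List (List Int)) : List (List Int) :=
  (List.range 5).foldl (fun M (i : Nat) => if pvMget M 0 (i : Int) = 0 then DFS 20 0 (i : Int) M else M) M
def pvA2 (M : List (List Int)) : List (List Int) :=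
  (List.range 5).foldl (fun M (i : Nat) => if pvMget M (4 - 1) (i : Int) = 0 then DFS 20 (4 - 1) (i : Int) M else M) (pvA1 M)
def pvA3 (M : List (List Int)) : List (List Int) :=
  (List.range 4).foldl (fun M (i : Nat) => if pvMget M (i : Int) 0 = 0 then DFS 20 (i : Int) 0 M else M) (pvA2 M)
def pvA4 (M : List (List Int)) : List (List Int) :=
  (List.range 4).foldl (fun M (i : Nat) => if pvMget M (i : Int) (5 - 1) = 0 then DFS 20 (i : Int) (5 - 1) M else M) (pvA3 M)
def pvCount (W : List (List Int)) : Int :=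
  (List.range 4).foldl (fun res (i : Nat) =>
    (List.range 5).foldl (fun res (j : Nat) => if pvMget W (i : Int) (j : Int) = 0 then res + 1 else res) res) 0
def pvB1 (M : List (List Int)) : List (List Int) × List (Int × Int) :=
  (List.range 4).foldl (fun st (i : Nat) =>
    (List.range 5).foldl (fun st (j : Nat) =>
      if (i = 0 ∨ i = 4 - 1 ∨ j = 0 ∨ j = 5 - 1) ∧ pvMget st.1 (i : Int) (j : Int) = 0
      then (pvMset st.1 (i : Int) (j : Int) 1, ((i : Int), (j : Int)) :: st.2)
      else st) st) (M, ([] : List (Int × Int)))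
def pvBf (M : List (List Int)) : List (List Int) := flood 20 (pvB1 M).2 (pvB1 M).1

theorem A_eq (M : List (List Int)) : CountAllZero M = pvCount (pvA4 M) := rfl
theorem B_eq (M : List (List Int)) : CountAllZero_alt M = pvCount (pvBf M) := rfl


-- window, boundary, adjacency, reachability on the fixed 4×5 grid
def inb (x y : Int) : Prop := 0 ≤ x ∧ x < 4 ∧ 0 ≤ y ∧ y < 5
def bdry (x y : Int) : Prop := x = 0 ∨ x = 3 ∨ y = 0 ∨ y = 4
def adj (x y a b : Int) : Prop :=
  (a = x ∧ b = y + 1) ∨ (a = x ∧ b = y - 1) ∨ (a = x + 1 ∧ b = y) ∨ (a = x - 1 ∧ b = y)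

inductive Reach (M0 : List (List Int)) : Int → Int → Prop
  | base {x y : Int} : inb x y → bdry x y → pvMget M0 x y = 0 → Reach M0 x y
  | step {x y a b : Int} : Reach M0 x y → adj x y a b → inb a b → pvMget M0 a b = 0 → Reach M0 a b

def winCells : List (Int × Int) :=
  [(0,0),(0,1),(0,2),(0,3),(0,4),(1,0),(1,1),(1,2),(1,3),(1,4),
   (2,0),(2,1),(2,2),(2,3),(2,4),(3,0),(3,1),(3,2),(3,3),(3,4)]

def zc (M : List (List Int)) : Nat := winCells.countP (fun c => decide (pvMget M c.1 c.2 = 0))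

def Marked (M0 M : List (List Int)) : Prop :=
  ∀ a b, inb a b → pvMget M a b = pvMget M0 a b ∨
    (pvMget M0 a b = 0 ∧ pvMget M a b = 1 ∧ Reach M0 a b)
def MonoM (M M' : List (List Int)) : Prop :=
  ∀ a b, inb a b → pvMget M a b ≠ 0 → pvMget M' a b = pvMget M a b
def ClosedAt (M : List (List Int)) (x y : Int) : Prop :=
  ∀ a b, adj x y a b → inb a b → pvMget M a b ≠ 0
def NewClosed (M M' : List (List Int)) : Prop :=
  ∀ a b, inb a b → pvMget M a b = 0 → pvMget M' a b ≠ 0 → ClosedAt M' a b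
def DfsOut (M0 M M' : List (List Int)) : Prop :=
  Pre_CountAllZero M' ∧ Marked M0 M' ∧ MonoM M M' ∧ NewClosed M M'

theorem mem_winCells (x y : Int) : (x, y) ∈ winCells ↔ inb x y := by
  constructor
  · intro h
    unfold winCells at h
    simp only [List.mem_cons, List.not_mem_nil, or_false, Prod.mk.injEq] at h
    unfold inb
    rcases h with ⟨rfl,rfl⟩|⟨rfl,rfl⟩|⟨rfl,rfl⟩|⟨rfl,rfl⟩|⟨rfl,rfl⟩|⟨rfl,rfl⟩|⟨rfl,rfl⟩|⟨rfl,rfl⟩|⟨rfl,rfl⟩|⟨rfl,rfl⟩|⟨rfl,rfl⟩|⟨rfl,rfl⟩|⟨rfl,rfl⟩|⟨rfl,rfl⟩|⟨rfl,rfl⟩|⟨rfl,rfl⟩|⟨rfl,rfl⟩|⟨rfl,rfl⟩|⟨rfl,rfl⟩|⟨rfl,rfl⟩ <;> norm_num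
  · intro h
    obtain ⟨h1, h2, h3, h4⟩ := h
    have hx : x = 0 ∨ x = 1 ∨ x = 2 ∨ x = 3 := by omega
    have hy : y = 0 ∨ y = 1 ∨ y = 2 ∨ y = 3 ∨ y = 4 := by omega
    rcases hx with rfl|rfl|rfl|rfl <;> rcases hy with rfl|rfl|rfl|rfl|rfl <;> decide
theorem reach_inb_zero {M0 : List (List Int)} {x y : Int} (h : Reach M0 x y) :
    inb x y ∧ pvMget M0 x y = 0 := by
  cases h with
  | base h1 h2 h3 => exact ⟨h1, h3⟩
  | step h1 h2 h3 h4 => exact ⟨h3, h4⟩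

theorem pre_pvMset (M : List (List Int)) (x y v : Int) (h : Pre_CountAllZero M) :
    Pre_CountAllZero (pvMset M x y v) := by
  obtain ⟨h1, h2⟩ := h
  refine ⟨by simpa [pvMset] using h1, ?_⟩
  intro i hi
  have h5 := h2 i hi
  simp only [pvMset, List.getD_eq_getElem?_getD, List.getElem?_modify] at h5 ⊢
  cases hM : M[i]? with
  | none => simp [hM] at h5
  | some row =>
    simp only [hM] at h5 ⊢
    split <;> simp [List.length_set] at * <;> omega
theorem mget_mset_self {M : List (List Int)} {x y : Int} (v : Int)
    (hp : Pre_CountAllZero M) (h : inb x y) : pvMget (pvMset M x y v) x y = v := by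
  obtain ⟨h1, h2⟩ := hp
  obtain ⟨hx0, hx4, hy0, hy5⟩ := h
  have hxlt : x.toNat < M.length := by omega
  have hrow : 5 ≤ (M.getD x.toNat []).length := h2 x.toNat (by omega)
  have hgetD : M.getD x.toNat [] = M[x.toNat] := by
    rw [List.getD_eq_getElem?_getD, List.getElem?_eq_getElem hxlt]; rfl
  have hylt : y.toNat < M[x.toNat].length := by rw [hgetD] at hrow; omega
  unfold pvMget pvMset
  simp only [List.getD_eq_getElem?_getD, List.getElem?_modify, List.getElem?_eq_getElem hxlt]
  simp [List.getElem?_set_self hylt]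

theorem mget_mset_other {M : List (List Int)} {x y a b : Int} (v : Int)
    (hxy : inb x y) (hab : inb a b) (hne : ¬(a = x ∧ b = y)) :
    pvMget (pvMset M x y v) a b = pvMget M a b := by
  obtain ⟨hx0, hx4, hy0, hy5⟩ := hxy
  obtain ⟨ha0, ha4, hb0, hb5⟩ := hab
  unfold pvMget pvMset
  simp only [List.getD_eq_getElem?_getD, List.getElem?_modify]
  by_cases hax : a = x
  · subst hax
    have hby : y.toNat ≠ b.toNat := by omega
    cases hM : M[a.toNat]? with
    | none => rfl
    | some row =>
      simp [List.getElem?_set_ne hby]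
  · simp [show ¬(x.toNat = a.toNat) from by omega]

theorem countP_lt_of {α : Type} {p q : α → Bool} :
    ∀ l : List α, (∀ a ∈ l, q a = true → p a = true) →
    ∀ a ∈ l, p a = true → q a = false → l.countP q < l.countP p := by
  intro l
  induction l with
  | nil => intro _ a ha; simp at ha
  | cons b t ih =>
    intro hqp a ha hp hq
    rw [List.countP_cons, List.countP_cons]
    rcases List.mem_cons.mp ha with rfl | hat
    · have hle : t.countP q ≤ t.countP p :=
        List.countP_mono_left (fun c hc => hqp c (List.mem_cons_of_mem _ hc))
      simp [hp, hq]
      omega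
    · have hlt := ih (fun c hc => hqp c (List.mem_cons_of_mem _ hc)) a hat hp hq
      have hhead : (if q b = true then 1 else 0) ≤ (if p b = true then 1 else 0) := by
        by_cases hb : q b = true
        · simp [hb, hqp b (List.mem_cons_self)]
        · simp [hb]
      omega

theorem zc_le20 (M : List (List Int)) : zc M ≤ 20 := by
  exact le_trans List.countP_le_length (by decide)
theorem zc_pos {M : List (List Int)} {x y : Int} (h : inb x y) (h0 : pvMget M x y = 0) :
    0 < zc M := by
  exact List.countP_pos_iff.mpr ⟨(x, y), (mem_winCells x y).mpr h, by simpa using h0⟩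
theorem zc_mono {M M' : List (List Int)} (h : MonoM M M') : zc M' ≤ zc M := by
  apply List.countP_mono_left
  intro c hc hz
  obtain ⟨a, b⟩ := c
  have hin := (mem_winCells a b).mp hc
  simp only [decide_eq_true_eq] at hz ⊢
  by_contra hne
  exact absurd (h a b hin hne ▸ hz) hne
theorem zc_mset {M : List (List Int)} {x y : Int} (hp : Pre_CountAllZero M)
    (h : inb x y) (h0 : pvMget M x y = 0) : zc (pvMset M x y 1) < zc M := by
  apply countP_lt_of winCells
  · intro c hc hz
    obtain ⟨a, b⟩ := c
    have hab := (mem_winCells a b).mp hc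
    simp only [decide_eq_true_eq] at hz ⊢
    by_cases hce : a = x ∧ b = y
    · obtain ⟨rfl, rfl⟩ := hce
      rw [mget_mset_self 1 hp h] at hz
      exact absurd hz one_ne_zero
    · rwa [mget_mset_other 1 h hab hce] at hz
  · exact (mem_winCells x y).mpr h
  · simpa using h0
  · simp [mget_mset_self 1 hp h]

theorem monoM_refl (M : List (List Int)) : MonoM M M := fun _ _ _ _ => rfl
theorem monoM_trans {M M' M'' : List (List Int)} (h : MonoM M M') (h' : MonoM M' M'') :
    MonoM M M'' := by
  intro a b hab hnz
  rw [h' a b hab (by rw [h a b hab hnz]; exact hnz), h a b hab hnz]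
theorem monoM_mset {M : List (List Int)} {x y : Int} (hxy : inb x y)
    (h0 : pvMget M x y = 0) : MonoM M (pvMset M x y 1) := by
  intro a b hab hnz
  apply mget_mset_other
  · exact hxy
  · exact hab
  · rintro ⟨rfl, rfl⟩; exact hnz h0
theorem marked_refl (M0 : List (List Int)) : Marked M0 M0 := fun _ _ _ => Or.inl rfl
theorem marked_zero {M0 M : List (List Int)} {x y : Int} (hm : Marked M0 M)
    (hxy : inb x y) (h0 : pvMget M x y = 0) : pvMget M0 x y = 0 := by
  rcases hm x y hxy with h | ⟨_, h1, _⟩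
  · rw [← h]; exact h0
  · rw [h0] at h1; exact absurd h1.symm one_ne_zero
theorem marked_val {M0 M : List (List Int)} {a b : Int} (hm : Marked M0 M)
    (hab : inb a b) (h0 : pvMget M0 a b = 0) (hnz : pvMget M a b ≠ 0) :
    pvMget M a b = 1 ∧ Reach M0 a b := by
  rcases hm a b hab with h | ⟨_, h1, h2⟩
  · exact absurd (h.trans h0) hnz
  · exact ⟨h1, h2⟩
theorem marked_mset {M0 M : List (List Int)} {x y : Int} (hp : Pre_CountAllZero M)
    (hm : Marked M0 M) (hxy : inb x y) (h0 : pvMget M0 x y = 0) (hr : Reach M0 x y) :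
    Marked M0 (pvMset M x y 1) := by
  intro a b hab
  by_cases hce : a = x ∧ b = y
  · obtain ⟨rfl, rfl⟩ := hce
    exact Or.inr ⟨h0, mget_mset_self 1 hp hxy, hr⟩
  · rw [mget_mset_other 1 hxy hab hce]
    exact hm a b hab
theorem closedAt_mono {M M' : List (List Int)} {x y : Int} (h : MonoM M M')
    (hc : ClosedAt M x y) : ClosedAt M' x y := by
  intro a b hadj hab
  have := hc a b hadj hab
  rw [h a b hab this]
  exact this

theorem dfsOut_refl {M0 M : List (List Int)} (hp : Pre_CountAllZero M) (hm : Marked M0 M) :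
    DfsOut M0 M M := ⟨hp, hm, monoM_refl M, fun _ _ _ h0 hnz => absurd h0 (fun h => hnz (h ▸ h0))⟩
theorem dfsOut_trans {M0 M M' M'' : List (List Int)} (h : DfsOut M0 M M')
    (h' : DfsOut M0 M' M'') : DfsOut M0 M M'' := by
  obtain ⟨hp1, hm1, ho1, hn1⟩ := h
  obtain ⟨hp2, hm2, ho2, hn2⟩ := h'
  refine ⟨hp2, hm2, monoM_trans ho1 ho2, ?_⟩
  intro a b hab h0 hnz
  by_cases hmid : pvMget M' a b = 0
  · exact hn2 a b hab hmid hnz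
  · exact closedAt_mono ho2 (hn1 a b hab h0 hmid)

theorem closedAt_of4 {W : List (List Int)} {x y : Int}
    (h1 : inb x (y + 1) → pvMget W x (y + 1) ≠ 0)
    (h2 : inb x (y - 1) → pvMget W x (y - 1) ≠ 0)
    (h3 : inb (x + 1) y → pvMget W (x + 1) y ≠ 0)
    (h4 : inb (x - 1) y → pvMget W (x - 1) y ≠ 0) : ClosedAt W x y := by
  intro a b hadj hab
  rcases hadj with ⟨rfl, rfl⟩ | ⟨rfl, rfl⟩ | ⟨rfl, rfl⟩ | ⟨rfl, rfl⟩
  · exact h1 hab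
  · exact h2 hab
  · exact h3 hab
  · exact h4 hab

theorem isSafe_iff {x y : Int} {M : List (List Int)} :
    isSafe x y M = true ↔ inb x y ∧ pvMget M x y = 0 := by
  unfold isSafe inb
  split
  case isTrue h => simp [h]
  case isFalse h => simpa using fun hb _ => h hb

theorem adj_of_k {x y : Int} {k : Nat} (hk : k < 4) :
    adj x y (x + pvR.getD k 0) (y + pvC.getD k 0) := by
  interval_cases k <;> simp [adj, pvR, pvC] <;> omega

theorem closedAt_of_kfacts {W : List (List Int)} {x y : Int}
    (h : ∀ k ∈ List.range 4, inb (x + pvR.getD k 0) (y + pvC.getD k 0) →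
      pvMget W (x + pvR.getD k 0) (y + pvC.getD k 0) ≠ 0) : ClosedAt W x y := by
  apply closedAt_of4
  · simpa [pvR, pvC] using h 0 (by decide)
  · simpa [pvR, pvC] using h 1 (by decide)
  · simpa [pvR, pvC] using h 2 (by decide)
  · simpa [pvR, pvC] using h 3 (by decide)

theorem adj_of_dir {x y : Int} {d : Int × Int} (hd : d ∈ pvDirs) :
    adj x y (x + d.1) (y + d.2) := by
  simp only [pvDirs, List.mem_cons, List.not_mem_nil, or_false] at hd
  unfold adj
  rcases hd with rfl | rfl | rfl | rfl <;> norm_num <;> ring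

theorem closedAt_of_dirfacts {W : List (List Int)} {x y : Int}
    (h : ∀ d ∈ pvDirs, inb (x + d.1) (y + d.2) → pvMget W (x + d.1) (y + d.2) ≠ 0) :
    ClosedAt W x y := by
  apply closedAt_of4
  · simpa using h (0, 1) (by decide)
  · simpa using h (0, -1) (by decide)
  · simpa using h (1, 0) (by decide)
  · simpa using h (-1, 0) (by decide)

-- main DFS invariant (A side)
theorem dfs_spec (M0 : List (List Int)) : ∀ (fuel : Nat) (x y : Int) (M : List (List Int)),
    Pre_CountAllZero M → Marked M0 M → zc M ≤ fuel → inb x y → Reach M0 x y →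
    pvMget M x y = 0 →
    DfsOut M0 M (DFS fuel x y M) ∧ pvMget (DFS fuel x y M) x y = 1 := by
  intro fuel
  induction fuel with
  | zero =>
    intro x y M hp hm hzc hin hr h0
    exact absurd hzc (by have := zc_pos hin h0; omega)
  | succ fuel ih =>
    have go : ∀ (ks : List Nat), (∀ k ∈ ks, k < 4) → ∀ (x y : Int) (M : List (List Int)),
        Pre_CountAllZero M → Marked M0 M → zc M ≤ fuel → Reach M0 x y →
        DfsOut M0 M (dfsGo fuel x y ks M) ∧
        (∀ k ∈ ks, inb (x + pvR.getD k 0) (y + pvC.getD k 0) →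
          pvMget (dfsGo fuel x y ks M) (x + pvR.getD k 0) (y + pvC.getD k 0) ≠ 0) := by
      intro ks
      induction ks with
      | nil =>
        intro _ x y M hp hm hzc hr
        refine ⟨?_, by simp⟩
        simp only [dfsGo]
        exact dfsOut_refl hp hm
      | cons k ks ihks =>
        intro hks x y M hp hm hzc hr
        have hk4 : k < 4 := hks k (List.mem_cons_self)
        simp only [dfsGo]
        by_cases hs : isSafe (x + pvR.getD k 0) (y + pvC.getD k 0) M = true
        · obtain ⟨hinb, h0n⟩ := isSafe_iff.mp hs
          have hreach : Reach M0 (x + pvR.getD k 0) (y + pvC.getD k 0) :=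
            Reach.step hr (adj_of_k hk4) hinb (marked_zero hm hinb h0n)
          have hd := ih (x + pvR.getD k 0) (y + pvC.getD k 0) M hp hm hzc hinb hreach h0n
          obtain ⟨⟨hp', hm', hmono', hnc'⟩, hval'⟩ := hd
          have hzc' : zc (DFS fuel (x + pvR.getD k 0) (y + pvC.getD k 0) M) ≤ fuel :=
            le_trans (zc_mono hmono') hzc
          have hrest := ihks (fun k hk => hks k (List.mem_cons_of_mem _ hk)) x y _ hp' hm' hzc' hr
          rw [if_pos hs]
          obtain ⟨hout, hnb⟩ := hrest
          refine ⟨dfsOut_trans ⟨hp', hm', hmono', hnc'⟩ hout, ?_⟩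
          intro k' hk' hinb'
          rcases List.mem_cons.mp hk' with rfl | hk't
          · rw [hout.2.2.1 _ _ hinb' (by rw [hval']; norm_num), hval']
            norm_num
          · exact hnb k' hk't hinb'
        · rw [if_neg hs]
          have hrest := ihks (fun k hk => hks k (List.mem_cons_of_mem _ hk)) x y M hp hm hzc hr
          obtain ⟨hout, hnb⟩ := hrest
          refine ⟨hout, ?_⟩
          intro k' hk' hinb'
          rcases List.mem_cons.mp hk' with rfl | hk't
          · have h0n : pvMget M (x + pvR.getD k' 0) (y + pvC.getD k' 0) ≠ 0 := by
              intro hz; exact hs (isSafe_iff.mpr ⟨hinb', hz⟩)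
            rw [hout.2.2.1 _ _ hinb' h0n]
            exact h0n
          · exact hnb k' hk't hinb'
    intro x y M hp hm hzc hin hr h0
    simp only [DFS]
    have h00 : pvMget M0 x y = 0 := marked_zero hm hin h0
    have hp1 : Pre_CountAllZero (pvMset M x y 1) := pre_pvMset M x y 1 hp
    have hm1 : Marked M0 (pvMset M x y 1) := marked_mset hp hm hin h00 hr
    have hzc1 : zc (pvMset M x y 1) ≤ fuel := by
      have := zc_mset hp hin h0; omega
    have hM1xy : pvMget (pvMset M x y 1) x y = 1 := mget_mset_self 1 hp hin
    obtain ⟨⟨hp', hm', hmono', hnc'⟩, hnb⟩ :=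
      go (List.range 4) (by simp) x y (pvMset M x y 1) hp1 hm1 hzc1 hr
    have hx1 : pvMget (dfsGo fuel x y (List.range 4) (pvMset M x y 1)) x y = 1 := by
      rw [hmono' x y hin (by rw [hM1xy]; norm_num), hM1xy]
    refine ⟨⟨hp', hm', monoM_trans (monoM_mset hin h0) hmono', ?_⟩, hx1⟩
    intro a b hab h0ab hnz
    by_cases hc : a = x ∧ b = y
    · obtain ⟨rfl, rfl⟩ := hc
      exact closedAt_of_kfacts hnb
    · have h1ab : pvMget (pvMset M x y 1) a b = 0 := by
        rw [mget_mset_other 1 hin hab hc]; exact h0ab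
      exact hnc' a b hab h1ab hnz

-- boundary loops of A, generalized over the visited coordinate list
theorem bdfold_spec (M0 : List (List Int)) (g : Nat → Int × Int) :
    ∀ (js : List Nat), (∀ i ∈ js, inb (g i).1 (g i).2 ∧ bdry (g i).1 (g i).2) →
    ∀ (M : List (List Int)), Pre_CountAllZero M → Marked M0 M →
    DfsOut M0 M (js.foldl (fun M (i : Nat) => if pvMget M (g i).1 (g i).2 = 0
        then DFS 20 (g i).1 (g i).2 M else M) M) ∧
    ∀ i ∈ js, pvMget M0 (g i).1 (g i).2 = 0 →
      pvMget (js.foldl (fun M (i : Nat) => if pvMget M (g i).1 (g i).2 = 0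
        then DFS 20 (g i).1 (g i).2 M else M) M) (g i).1 (g i).2 ≠ 0 := by
  intro js
  induction js with
  | nil =>
    intro _ M hp hm
    exact ⟨dfsOut_refl hp hm, by simp⟩
  | cons i js ihjs =>
    intro hg M hp hm
    obtain ⟨hin, hbd⟩ := hg i (List.mem_cons_self)
    simp only [List.foldl_cons]
    by_cases h0 : pvMget M (g i).1 (g i).2 = 0
    · rw [if_pos h0]
      have hreach : Reach M0 (g i).1 (g i).2 :=
        Reach.base hin hbd (marked_zero hm hin h0)
      obtain ⟨⟨hp', hm', hmono', hnc'⟩, hval'⟩ :=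
        dfs_spec M0 20 (g i).1 (g i).2 M hp hm (zc_le20 M) hin hreach h0
      obtain ⟨hout, hcomp⟩ := ihjs (fun j hj => hg j (List.mem_cons_of_mem _ hj)) _ hp' hm'
      refine ⟨dfsOut_trans ⟨hp', hm', hmono', hnc'⟩ hout, ?_⟩
      intro j hj h0j
      rcases List.mem_cons.mp hj with rfl | hjt
      · rw [hout.2.2.1 _ _ hin (by rw [hval']; norm_num), hval']
        norm_num
      · exact hcomp j hjt h0j
    · rw [if_neg h0]
      obtain ⟨hout, hcomp⟩ := ihjs (fun j hj => hg j (List.mem_cons_of_mem _ hj)) M hp hm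
      refine ⟨hout, ?_⟩
      intro j hj h0j
      rcases List.mem_cons.mp hj with rfl | hjt
      · rw [hout.2.2.1 _ _ hin h0]
        exact h0
      · exact hcomp j hjt h0j

-- B side: stack invariants
def StackOK (M0 M : List (List Int)) (stk : List (Int × Int)) : Prop :=
  ∀ p ∈ stk, inb p.1 p.2 ∧ pvMget M0 p.1 p.2 = 0 ∧ pvMget M p.1 p.2 ≠ 0 ∧ Reach M0 p.1 p.2
def CEx (M0 M : List (List Int)) (stk : List (Int × Int)) : Prop :=
  ∀ a b, inb a b → pvMget M0 a b = 0 → pvMget M a b ≠ 0 → (a, b) ∉ stk → ClosedAt M a b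

theorem floodGo_spec (M0 : List (List Int)) (x y : Int) (fuel : Nat)
    (hr : Reach M0 x y) :
    ∀ (ds : List (Int × Int)), (∀ d ∈ ds, d ∈ pvDirs) →
    ∀ (st : List (List Int) × List (Int × Int)),
    Pre_CountAllZero st.1 → Marked M0 st.1 → StackOK M0 st.1 st.2 →
    st.2.length + zc st.1 ≤ fuel →
    (∀ a b, inb a b → pvMget M0 a b = 0 → pvMget st.1 a b ≠ 0 → (a, b) ∉ st.2 →
      (a, b) = (x, y) ∨ ClosedAt st.1 a b) →
    let res := ds.foldl (fun st d =>
      if 0 ≤ x + d.1 ∧ x + d.1 < 4 ∧ 0 ≤ y + d.2 ∧ y + d.2 < 5 ∧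
          pvMget st.1 (x + d.1) (y + d.2) = 0
      then (pvMset st.1 (x + d.1) (y + d.2) 1, (x + d.1, y + d.2) :: st.2)
      else st) st
    Pre_CountAllZero res.1 ∧ Marked M0 res.1 ∧ StackOK M0 res.1 res.2 ∧
    res.2.length + zc res.1 ≤ fuel ∧
    (∀ a b, inb a b → pvMget M0 a b = 0 → pvMget res.1 a b ≠ 0 → (a, b) ∉ res.2 →
      (a, b) = (x, y) ∨ ClosedAt res.1 a b) ∧
    MonoM st.1 res.1 ∧
    (∀ d ∈ ds, inb (x + d.1) (y + d.2) → pvMget res.1 (x + d.1) (y + d.2) ≠ 0) := by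
  intro ds
  induction ds with
  | nil =>
    intro _ st hp hm hstk hlen hcex
    exact ⟨hp, hm, hstk, hlen, hcex, monoM_refl _, by simp⟩
  | cons d ds ihds =>
    intro hds st hp hm hstk hlen hcex
    dsimp only
    simp only [List.foldl_cons]
    by_cases hcond : 0 ≤ x + d.1 ∧ x + d.1 < 4 ∧ 0 ≤ y + d.2 ∧ y + d.2 < 5 ∧
        pvMget st.1 (x + d.1) (y + d.2) = 0
    · rw [if_pos hcond]
      obtain ⟨hb1, hb2, hb3, hb4, h0⟩ := hcond
      have hinb : inb (x + d.1) (y + d.2) := ⟨hb1, hb2, hb3, hb4⟩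
      have h00 : pvMget M0 (x + d.1) (y + d.2) = 0 := marked_zero hm hinb h0
      have hr' : Reach M0 (x + d.1) (y + d.2) :=
        Reach.step hr (adj_of_dir (hds d (List.mem_cons_self))) hinb h00
      have hmono1 : MonoM st.1 (pvMset st.1 (x + d.1) (y + d.2) 1) := monoM_mset hinb h0
      have hval1 : pvMget (pvMset st.1 (x + d.1) (y + d.2) 1) (x + d.1) (y + d.2) = 1 :=
        mget_mset_self 1 hp hinb
      have hp' : Pre_CountAllZero (pvMset st.1 (x + d.1) (y + d.2) 1) := pre_pvMset _ _ _ _ hp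
      have hm' := marked_mset hp hm hinb h00 hr'
      have hstk' : StackOK M0 (pvMset st.1 (x + d.1) (y + d.2) 1)
          ((x + d.1, y + d.2) :: st.2) := by
        intro p hpm
        rcases List.mem_cons.mp hpm with rfl | hpt
        · exact ⟨hinb, h00, by rw [hval1]; norm_num, hr'⟩
        · obtain ⟨hq1, hq2, hq3, hq4⟩ := hstk p hpt
          exact ⟨hq1, hq2, by rw [hmono1 p.1 p.2 hq1 hq3]; exact hq3, hq4⟩
      have hlen' : ((x + d.1, y + d.2) :: st.2).length +
          zc (pvMset st.1 (x + d.1) (y + d.2) 1) ≤ fuel := by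
        have := zc_mset hp hinb h0
        simp only [List.length_cons]
        omega
      have hcex' : ∀ a b, inb a b → pvMget M0 a b = 0 →
          pvMget (pvMset st.1 (x + d.1) (y + d.2) 1) a b ≠ 0 →
          (a, b) ∉ (x + d.1, y + d.2) :: st.2 →
          (a, b) = (x, y) ∨ ClosedAt (pvMset st.1 (x + d.1) (y + d.2) 1) a b := by
        intro a b hab h0ab hnz hnotin
        have hne : ¬(a = x + d.1 ∧ b = y + d.2) := by
          rintro ⟨rfl, rfl⟩
          exact hnotin (List.mem_cons_self)
        have hnotin' : (a, b) ∉ st.2 := fun h => hnotin (List.mem_cons_of_mem _ h)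
        rw [mget_mset_other 1 hinb hab hne] at hnz
        rcases hcex a b hab h0ab hnz hnotin' with h | h
        · exact Or.inl h
        · exact Or.inr (closedAt_mono hmono1 h)
      have hrest := ihds (fun d' hd' => hds d' (List.mem_cons_of_mem _ hd'))
        (pvMset st.1 (x + d.1) (y + d.2) 1, (x + d.1, y + d.2) :: st.2)
        hp' hm' hstk' hlen' hcex'
      obtain ⟨hp'', hm'', hstk'', hlen'', hcex'', hmono'', hnb''⟩ := hrest
      refine ⟨hp'', hm'', hstk'', hlen'', hcex'', monoM_trans hmono1 hmono'', ?_⟩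
      intro d' hd' hinb'
      rcases List.mem_cons.mp hd' with rfl | hd't
      · rw [hmono'' _ _ hinb' (by rw [hval1]; norm_num), hval1]
        norm_num
      · exact hnb'' d' hd't hinb'
    · rw [if_neg hcond]
      have hrest := ihds (fun d' hd' => hds d' (List.mem_cons_of_mem _ hd')) st
        hp hm hstk hlen hcex
      obtain ⟨hp'', hm'', hstk'', hlen'', hcex'', hmono'', hnb''⟩ := hrest
      refine ⟨hp'', hm'', hstk'', hlen'', hcex'', hmono'', ?_⟩
      intro d' hd' hinb'
      rcases List.mem_cons.mp hd' with rfl | hd't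
      · have hnz : pvMget st.1 (x + d'.1) (y + d'.2) ≠ 0 := fun hz =>
          hcond ⟨hinb'.1, hinb'.2.1, hinb'.2.2.1, hinb'.2.2.2, hz⟩
        rw [hmono'' _ _ hinb' hnz]
        exact hnz
      · exact hnb'' d' hd't hinb'

theorem flood_spec (M0 : List (List Int)) : ∀ (fuel : Nat) (stk : List (Int × Int))
    (M : List (List Int)), Pre_CountAllZero M → Marked M0 M → StackOK M0 M stk →
    stk.length + zc M ≤ fuel → CEx M0 M stk →
    Pre_CountAllZero (flood fuel stk M) ∧ Marked M0 (flood fuel stk M) ∧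
    MonoM M (flood fuel stk M) ∧ NewClosed M0 (flood fuel stk M) := by
  intro fuel
  induction fuel with
  | zero =>
    intro stk M hp hm hstk hlen hcex
    cases stk with
    | nil =>
      simp only [flood]
      exact ⟨hp, hm, monoM_refl M, fun a b hab h0 hnz => hcex a b hab h0 hnz (by simp)⟩
    | cons p stk => simp at hlen
  | succ fuel ih =>
    intro stk M hp hm hstk hlen hcex
    cases stk with
    | nil =>
      simp only [flood]
      exact ⟨hp, hm, monoM_refl M, fun a b hab h0 hnz => hcex a b hab h0 hnz (by simp)⟩
    | cons p stk =>
      obtain ⟨hpin, hp0, hpnz, hpr⟩ := hstk p (List.mem_cons_self)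
      simp only [flood]
      have hcexw : ∀ a b, inb a b → pvMget M0 a b = 0 → pvMget M a b ≠ 0 → (a, b) ∉ stk →
          (a, b) = (p.1, p.2) ∨ ClosedAt M a b := by
        intro a b hab h0 hnz hnotin
        by_cases he : (a, b) = (p.1, p.2)
        · exact Or.inl he
        · refine Or.inr (hcex a b hab h0 hnz ?_)
          intro hmem
          rcases List.mem_cons.mp hmem with h | h
          · exact he (by rw [h])
          · exact hnotin h
      have hgo := floodGo_spec M0 p.1 p.2 fuel hpr pvDirs (fun d hd => hd) (M, stk)
        hp hm (fun q hq => hstk q (List.mem_cons_of_mem _ hq))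
        (by dsimp only; simp only [List.length_cons] at hlen; omega) hcexw
      obtain ⟨hp', hm', hstk', hlen', hcex', hmono', hnb'⟩ := hgo
      have hclosedp := closedAt_of_dirfacts hnb'
      obtain ⟨hpf, hmf, hmonof, hncf⟩ := ih _ _ hp' hm' hstk' hlen' (by
        intro a b hab h0 hnz hnotin
        rcases hcex' a b hab h0 hnz hnotin with h | h
        · rw [show a = p.1 from congrArg Prod.fst h, show b = p.2 from congrArg Prod.snd h]
          exact hclosedp
        · exact h)
      exact ⟨hpf, hmf, monoM_trans hmono' hmonof, hncf⟩

-- B side: boundary sweep (phase 1)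
def P1Inv (M0 : List (List Int)) (st : List (List Int) × List (Int × Int)) : Prop :=
  Pre_CountAllZero st.1 ∧ Marked M0 st.1 ∧ StackOK M0 st.1 st.2 ∧
  (∀ a b, inb a b → pvMget M0 a b = 0 → pvMget st.1 a b ≠ 0 → (a, b) ∈ st.2) ∧
  st.2.length + zc st.1 ≤ 20

theorem p1inner_spec (M0 : List (List Int)) (i : Nat) (hi : i < 4) :
    ∀ (js : List Nat), (∀ j ∈ js, j < 5) →
    ∀ (st : List (List Int) × List (Int × Int)), P1Inv M0 st →
    let res := js.foldl (fun st (j : Nat) =>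
      if (i = 0 ∨ i = 4 - 1 ∨ j = 0 ∨ j = 5 - 1) ∧ pvMget st.1 (i : Int) (j : Int) = 0
      then (pvMset st.1 (i : Int) (j : Int) 1, ((i : Int), (j : Int)) :: st.2)
      else st) st
    P1Inv M0 res ∧ MonoM st.1 res.1 ∧
    (∀ j ∈ js, (i = 0 ∨ i = 4 - 1 ∨ j = 0 ∨ j = 5 - 1) → pvMget M0 (i : Int) (j : Int) = 0 →
      pvMget res.1 (i : Int) (j : Int) ≠ 0) := by
  intro js
  induction js with
  | nil =>
    intro _ st hinv
    exact ⟨hinv, monoM_refl _, by simp⟩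
  | cons j js ihjs =>
    intro hjs st hinv
    have hj5 : j < 5 := hjs j (List.mem_cons_self)
    simp only [List.foldl_cons]
    by_cases hcond : (i = 0 ∨ i = 4 - 1 ∨ j = 0 ∨ j = 5 - 1) ∧
        pvMget st.1 (i : Int) (j : Int) = 0
    · rw [if_pos hcond]
      obtain ⟨hbd, h0⟩ := hcond
      obtain ⟨hp, hm, hstk, hcov, hlen⟩ := hinv
      have hinb : inb (i : Int) (j : Int) := by unfold inb; omega
      have hbd' : bdry (i : Int) (j : Int) := by unfold bdry; omega
      have h00 : pvMget M0 (i : Int) (j : Int) = 0 := marked_zero hm hinb h0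
      have hr : Reach M0 (i : Int) (j : Int) := Reach.base hinb hbd' h00
      have hmono1 : MonoM st.1 (pvMset st.1 (i : Int) (j : Int) 1) := monoM_mset hinb h0
      have hval1 : pvMget (pvMset st.1 (i : Int) (j : Int) 1) (i : Int) (j : Int) = 1 :=
        mget_mset_self 1 hp hinb
      have hinv' : P1Inv M0 (pvMset st.1 (i : Int) (j : Int) 1,
          ((i : Int), (j : Int)) :: st.2) := by
        refine ⟨pre_pvMset _ _ _ _ hp, marked_mset hp hm hinb h00 hr, ?_, ?_, ?_⟩
        · intro p hpm
          rcases List.mem_cons.mp hpm with rfl | hpt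
          · exact ⟨hinb, h00, by rw [hval1]; norm_num, hr⟩
          · obtain ⟨hq1, hq2, hq3, hq4⟩ := hstk p hpt
            exact ⟨hq1, hq2, by rw [hmono1 p.1 p.2 hq1 hq3]; exact hq3, hq4⟩
        · intro a b hab h0ab hnz
          by_cases he : a = (i : Int) ∧ b = (j : Int)
          · obtain ⟨rfl, rfl⟩ := he
            exact List.mem_cons_self
          · rw [mget_mset_other 1 hinb hab he] at hnz
            exact List.mem_cons_of_mem _ (hcov a b hab h0ab hnz)
        · have := zc_mset hp hinb h0
          simp only [List.length_cons]
          omega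
      obtain ⟨hinv'', hmono'', hcomp''⟩ := ihjs (fun j' hj' => hjs j' (List.mem_cons_of_mem _ hj')) _ hinv'
      refine ⟨hinv'', monoM_trans hmono1 hmono'', ?_⟩
      intro j' hj' hbdj' h0j'
      rcases List.mem_cons.mp hj' with rfl | hj't
      · rw [hmono'' _ _ hinb (by rw [hval1]; norm_num), hval1]
        norm_num
      · exact hcomp'' j' hj't hbdj' h0j'
    · rw [if_neg hcond]
      obtain ⟨hinv'', hmono'', hcomp''⟩ := ihjs (fun j' hj' => hjs j' (List.mem_cons_of_mem _ hj')) st hinv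
      refine ⟨hinv'', hmono'', ?_⟩
      intro j' hj' hbdj' h0j'
      rcases List.mem_cons.mp hj' with rfl | hj't
      · have hnz : pvMget st.1 (i : Int) (j' : Int) ≠ 0 := fun hz => hcond ⟨hbdj', hz⟩
        have hinb : inb (i : Int) (j' : Int) := by
          unfold inb; have := hjs j' (List.mem_cons_self); omega
        rw [hmono'' _ _ hinb hnz]
        exact hnz
      · exact hcomp'' j' hj't hbdj' h0j'

theorem p1outer_spec (M0 : List (List Int)) :
    ∀ (is : List Nat), (∀ i ∈ is, i < 4) →
    ∀ (st : List (List Int) × List (Int × Int)), P1Inv M0 st →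
    let res := is.foldl (fun st (i : Nat) =>
      (List.range 5).foldl (fun st (j : Nat) =>
        if (i = 0 ∨ i = 4 - 1 ∨ j = 0 ∨ j = 5 - 1) ∧ pvMget st.1 (i : Int) (j : Int) = 0
        then (pvMset st.1 (i : Int) (j : Int) 1, ((i : Int), (j : Int)) :: st.2)
        else st) st) st
    P1Inv M0 res ∧ MonoM st.1 res.1 ∧
    (∀ i ∈ is, ∀ j : Nat, j < 5 → (i = 0 ∨ i = 4 - 1 ∨ j = 0 ∨ j = 5 - 1) →
      pvMget M0 (i : Int) (j : Int) = 0 → pvMget res.1 (i : Int) (j : Int) ≠ 0) := by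
  intro is
  induction is with
  | nil =>
    intro _ st hinv
    exact ⟨hinv, monoM_refl _, by simp⟩
  | cons i is ihis =>
    intro his st hinv
    have hi4 : i < 4 := his i (List.mem_cons_self)
    simp only [List.foldl_cons]
    obtain ⟨hinv', hmono', hcomp'⟩ :=
      p1inner_spec M0 i hi4 (List.range 5) (by simp) st hinv
    obtain ⟨hinv'', hmono'', hcomp''⟩ := ihis (fun i' hi' => his i' (List.mem_cons_of_mem _ hi')) _ hinv'
    refine ⟨hinv'', monoM_trans hmono' hmono'', ?_⟩
    intro i' hi' j hj hbdj h0j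
    rcases List.mem_cons.mp hi' with rfl | hi't
    · have hinb : inb (i' : Int) (j : Int) := by unfold inb; omega
      have := hcomp' j (List.mem_range.mpr hj) hbdj h0j
      rw [hmono'' _ _ hinb this]
      exact this
    · exact hcomp'' i' hi't j hj hbdj h0j

-- completeness: every boundary-reachable zero is marked in any closed, marked, boundary-complete state
theorem reach_marked {M0 Mf : List (List Int)} (hc : NewClosed M0 Mf)
    (hbd : ∀ x y, inb x y → bdry x y → pvMget M0 x y = 0 → pvMget Mf x y ≠ 0) :
    ∀ x y, Reach M0 x y → pvMget Mf x y ≠ 0 := by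
  intro x y h
  induction h with
  | base h1 h2 h3 => exact hbd _ _ h1 h2 h3
  | step h1 h2 h3 h4 ih =>
    obtain ⟨hin', hz'⟩ := reach_inb_zero h1
    exact hc _ _ hin' hz' ih _ _ h2 h3

theorem char_eq {M0 MA MB : List (List Int)} (hA : Marked M0 MA) (hB : Marked M0 MB)
    (hcA : ∀ x y, Reach M0 x y → pvMget MA x y ≠ 0)
    (hcB : ∀ x y, Reach M0 x y → pvMget MB x y ≠ 0) :
    ∀ x y, inb x y → pvMget MA x y = pvMget MB x y := by
  intro x y hin
  by_cases h0 : pvMget M0 x y = 0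
  · by_cases hr : Reach M0 x y
    · rw [(marked_val hA hin h0 (hcA _ _ hr)).1, (marked_val hB hin h0 (hcB _ _ hr)).1]
    · have hva : pvMget MA x y = 0 := by
        rcases hA x y hin with h | ⟨_, _, h2⟩
        · rw [h]; exact h0
        · exact absurd h2 hr
      have hvb : pvMget MB x y = 0 := by
        rcases hB x y hin with h | ⟨_, _, h2⟩
        · rw [h]; exact h0
        · exact absurd h2 hr
      rw [hva, hvb]
  · have hva : pvMget MA x y = pvMget M0 x y := by
      rcases hA x y hin with h | ⟨h1, _, _⟩
      · exact h
      · exact absurd h1 h0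
    have hvb : pvMget MB x y = pvMget M0 x y := by
      rcases hB x y hin with h | ⟨h1, _, _⟩
      · exact h
      · exact absurd h1 h0
    rw [hva, hvb]

theorem count_congr {W W' : List (List Int)}
    (h : ∀ x y, inb x y → pvMget W x y = pvMget W' x y) : pvCount W = pvCount W' := by
  unfold pvCount
  apply List.foldl_ext
  intro res i hi
  apply List.foldl_ext
  intro res j hj
  rw [h (i : Int) (j : Int) (by
    simp only [List.mem_range] at hi hj
    unfold inb
    omega)]

-- ===== VERDICT (by name: the statement is the Claim_ definition above) =====
set_option maxHeartbeats 1000000 in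
theorem CountAllZero_spec : Claim_equal_CountAllZero := by
  intro M hdom hpre
  unfold Spec_CountAllZero
  rw [A_eq, B_eq]
  -- A side: chain the four boundary folds
  have hA1 : DfsOut M M (pvA1 M) ∧ (∀ i ∈ List.range 5, pvMget M 0 (i : Int) = 0 →
      pvMget (pvA1 M) 0 (i : Int) ≠ 0) :=
    bdfold_spec M (fun i => ((0 : Int), (i : Int))) (List.range 5)
      (by intro i hi; simp only [List.mem_range] at hi
          exact ⟨by unfold inb; dsimp only; omega, by unfold bdry; dsimp only; omega⟩)
      M hpre (marked_refl M)
  have hA2 : DfsOut M (pvA1 M) (pvA2 M) ∧ (∀ i ∈ List.range 5,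
      pvMget M (4 - 1) (i : Int) = 0 → pvMget (pvA2 M) (4 - 1) (i : Int) ≠ 0) :=
    bdfold_spec M (fun i => ((4 - 1 : Int), (i : Int))) (List.range 5)
      (by intro i hi; simp only [List.mem_range] at hi
          exact ⟨by unfold inb; dsimp only; omega, by unfold bdry; dsimp only; omega⟩)
      (pvA1 M) hA1.1.1 hA1.1.2.1
  have hA3 : DfsOut M (pvA2 M) (pvA3 M) ∧ (∀ i ∈ List.range 4,
      pvMget M (i : Int) 0 = 0 → pvMget (pvA3 M) (i : Int) 0 ≠ 0) :=
    bdfold_spec M (fun i => ((i : Int), (0 : Int))) (List.range 4)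
      (by intro i hi; simp only [List.mem_range] at hi
          exact ⟨by unfold inb; dsimp only; omega, by unfold bdry; dsimp only; omega⟩)
      (pvA2 M) hA2.1.1 hA2.1.2.1
  have hA4 : DfsOut M (pvA3 M) (pvA4 M) ∧ (∀ i ∈ List.range 4,
      pvMget M (i : Int) (5 - 1) = 0 → pvMget (pvA4 M) (i : Int) (5 - 1) ≠ 0) :=
    bdfold_spec M (fun i => ((i : Int), (5 - 1 : Int))) (List.range 4)
      (by intro i hi; simp only [List.mem_range] at hi
          exact ⟨by unfold inb; dsimp only; omega, by unfold bdry; dsimp only; omega⟩)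
      (pvA3 M) hA3.1.1 hA3.1.2.1
  have hDA : DfsOut M M (pvA4 M) :=
    dfsOut_trans (dfsOut_trans (dfsOut_trans hA1.1 hA2.1) hA3.1) hA4.1
  have hcA := reach_marked hDA.2.2.2 (by
    intro x y hin hbd h0
    obtain ⟨hx0, hx4, hy0, hy5⟩ := hin
    have hx' : ((x.toNat : Int)) = x := Int.toNat_of_nonneg hx0
    have hy' : ((y.toNat : Int)) = y := Int.toNat_of_nonneg hy0
    have hin : inb x y := ⟨hx0, hx4, hy0, hy5⟩
    rcases hbd with rfl | rfl | rfl | rfl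
    · have h1 := hA1.2 y.toNat (List.mem_range.mpr (by omega)) (by rw [hy']; exact h0)
      rw [hy'] at h1
      have h2 : pvMget (pvA2 M) 0 y ≠ 0 := by rw [hA2.1.2.2.1 _ _ hin h1]; exact h1
      have h3 : pvMget (pvA3 M) 0 y ≠ 0 := by rw [hA3.1.2.2.1 _ _ hin h2]; exact h2
      rw [hA4.1.2.2.1 _ _ hin h3]; exact h3
    · have h31 : (4 - 1 : Int) = 3 := by norm_num
      have h1 := hA2.2 y.toNat (List.mem_range.mpr (by omega)) (by rw [hy', h31]; exact h0)
      rw [hy', h31] at h1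
      have h3 : pvMget (pvA3 M) 3 y ≠ 0 := by rw [hA3.1.2.2.1 _ _ hin h1]; exact h1
      rw [hA4.1.2.2.1 _ _ hin h3]; exact h3
    · have h1 := hA3.2 x.toNat (List.mem_range.mpr (by omega)) (by rw [hx']; exact h0)
      rw [hx'] at h1
      rw [hA4.1.2.2.1 _ _ hin h1]; exact h1
    · have h51 : (5 - 1 : Int) = 4 := by norm_num
      have h1 := hA4.2 x.toNat (List.mem_range.mpr (by omega)) (by rw [hx', h51]; exact h0)
      rw [hx', h51] at h1
      exact h1)
  -- B side: boundary sweep then flood fill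
  have hB1 : P1Inv M (pvB1 M) ∧ MonoM M (pvB1 M).1 ∧
      (∀ i ∈ List.range 4, ∀ j : Nat, j < 5 → (i = 0 ∨ i = 4 - 1 ∨ j = 0 ∨ j = 5 - 1) →
        pvMget M (i : Int) (j : Int) = 0 → pvMget (pvB1 M).1 (i : Int) (j : Int) ≠ 0) :=
    p1outer_spec M (List.range 4) (by simp) (M, ([] : List (Int × Int)))
      ⟨hpre, marked_refl M, by intro p hp; simp at hp,
       fun a b _ h0 hnz => absurd h0 hnz, by simpa using zc_le20 M⟩
  obtain ⟨⟨hpS, hmS, hstkS, hcovS, hlenS⟩, hmonoS, hcompS⟩ := hB1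
  have hF : Pre_CountAllZero (pvBf M) ∧ Marked M (pvBf M) ∧ MonoM (pvB1 M).1 (pvBf M) ∧
      NewClosed M (pvBf M) :=
    flood_spec M 20 (pvB1 M).2 (pvB1 M).1 hpS hmS hstkS hlenS
      (fun a b hab h0 hnz hnotin => absurd (hcovS a b hab h0 hnz) hnotin)
  obtain ⟨hpF, hmF, hmonoF, hncF⟩ := hF
  have hcB := reach_marked hncF (by
    intro x y hin hbd h0
    obtain ⟨hx0, hx4, hy0, hy5⟩ := hin
    have hx' : ((x.toNat : Int)) = x := Int.toNat_of_nonneg hx0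
    have hy' : ((y.toNat : Int)) = y := Int.toNat_of_nonneg hy0
    have h1 := hcompS x.toNat (List.mem_range.mpr (by omega)) y.toNat (by omega)
      (by unfold bdry at hbd; omega) (by rw [hx', hy']; exact h0)
    rw [hx', hy'] at h1
    rw [hmonoF _ _ ⟨hx0, hx4, hy0, hy5⟩ h1]
    exact h1)
  exact count_congr (char_eq hDA.2.1 hmF hcA hcB)
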